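-- pv_equiv track=rewrite | github.com/minhquana1906/Algorithm | TTUD_HK5/GiaiDe/BT_Chuong2/Map/22_NhapSanPham.py | merge_products
-- ===== SOURCE A (Python) =====
-- def merge_products(A, B):
--     # Create set of products in kho A
--     products_A = set(A)
--
--     # Check each product in kho B
--     result = []
--     for product in B:
--         if product not in products_A:
--             result.append(True)
--             # Add to set A since we'll import it
--             products_A.add(product)
--         else:
--             result.append(False)
--
--     return result
-- ===== SOURCE B (Python) =====
-- def merge_products(A, B):
--     # Two staged passes: index every value by its FIRST position in A+B,
--     # then B[j] is "new" iff that first position is exactly len(A)+j.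
--     B = list(B)
--     first = {}
--     for i, x in enumerate(A + B):
--         if x not in first:
--             first[x] = i
--     n = len(A)
--     return [first[x] == n + j for j, x in enumerate(B)]
-- ===== Notes on version B (the rewrite author's own statement) =====
-- stated objective: alternative
-- what changed: Replaces the single stateful scan with a growing seen-set by two staged passes: first build a dict mapping each value to the index of its first occurrence in A+B, then mark B[j] new iff that first occurrence equals len(A)+j.
import Mathlib
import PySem

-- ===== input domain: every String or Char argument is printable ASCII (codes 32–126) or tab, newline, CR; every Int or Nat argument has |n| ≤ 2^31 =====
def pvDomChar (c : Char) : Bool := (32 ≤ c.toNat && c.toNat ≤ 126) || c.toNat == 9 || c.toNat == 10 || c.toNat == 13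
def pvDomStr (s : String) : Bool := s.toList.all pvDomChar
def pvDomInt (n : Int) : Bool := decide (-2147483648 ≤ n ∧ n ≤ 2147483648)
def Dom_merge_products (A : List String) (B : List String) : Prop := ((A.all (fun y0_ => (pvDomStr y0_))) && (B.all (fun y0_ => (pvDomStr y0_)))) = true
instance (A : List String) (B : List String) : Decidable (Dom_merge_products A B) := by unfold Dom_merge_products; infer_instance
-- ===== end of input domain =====

-- B builds a first-occurrence index table of A+B in one pass, then marks B[j] new iff its
-- first occurrence sits exactly at offset len(A)+j; alternative decomposition, same cost.

-- ===== PORT A =====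
def merge_products (A : List String) (B : List String) : List Bool :=
  let products_A := PySem.Set.ofList A
  (B.foldl
    (fun (st : PySem.Set String × List Bool) product =>
      if ¬ (PySem.Set.contains st.1 product) then
        (PySem.Set.add st.1 product, st.2 ++ [true])
      else
        (st.1, st.2 ++ [false]))
    (products_A, [])).2

-- ===== PORT B =====
def merge_products_alt (A : List String) (B : List String) : List Bool :=
  let first := (PySem.List.enumerate (A ++ B)).foldl
    (fun (d : PySem.Dict String Int) ix =>
      if ¬ (d.contains ix.2) then d.insert ix.2 ix.1 else d)
    PySem.Dict.empty
  let n : Int := (A.length : Int)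
  -- first[x] never raises here (every x of B occurs in A ++ B), so get? is always some
  (PySem.List.enumerate B).map (fun jx => first.get? jx.2 == some (n + jx.1))

-- ===== PRECONDITION & SPEC =====
def Spec_merge_products (A : List String) (B : List String) (out : List Bool) : Prop := out = merge_products_alt A B
instance (A : List String) (B : List String) (out : List Bool) : Decidable (Spec_merge_products A B out) := by unfold Spec_merge_products; infer_instance

-- ===== CLAIM (what is proved, stated in full; the proofs are below) =====
def Claim_equal_merge_products : Prop := ∀ (A : List String) (B : List String), Dom_merge_products A B → Spec_merge_products A B (merge_products A B)

-- ===== LEMMAS AND PROOFS =====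

-- Reference function: k-th answer is "B2's k-th element is not in P ++ (prefix of B2 before k)".
def pvG (P : List String) : List String → List Bool
  | [] => []
  | x :: t => (!(P.contains x)) :: pvG (P ++ [x]) t

theorem pvG_length (P : List String) (B2 : List String) : (pvG P B2).length = B2.length := by
  induction B2 generalizing P with
  | nil => rfl
  | cons x t ih => simp [pvG, ih]

theorem pvG_getElem (B2 : List String) (P : List String) (k : Nat) (h : k < B2.length)
    (h' : k < (pvG P B2).length) :
    (pvG P B2)[k] = !((P ++ B2.take k).contains B2[k]) := by
  induction B2 generalizing P k with
  | nil => simp at h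
  | cons x t ih =>
    cases k with
    | zero => simp [pvG]
    | succ k =>
      have hk : k < t.length := by simpa using h
      have hk' : k < (pvG (P ++ [x]) t).length := by rw [pvG_length]; exact hk
      simp only [pvG, List.getElem_cons_succ, List.take_succ_cons]
      rw [ih (P ++ [x]) k hk hk']
      simp

theorem pvLoop (B2 : List String) (s : PySem.Set String) (acc : List Bool) (P : List String)
    (hs : ∀ y, PySem.Set.contains s y = P.contains y) :
    (B2.foldl
      (fun (st : PySem.Set String × List Bool) product =>
        if ¬ (PySem.Set.contains st.1 product) then
          (PySem.Set.add st.1 product, st.2 ++ [true])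
        else
          (st.1, st.2 ++ [false]))
      (s, acc)).2 = acc ++ pvG P B2 := by
  induction B2 generalizing s acc P with
  | nil => simp [pvG]
  | cons x t ih =>
    simp only [List.foldl_cons, hs x]
    by_cases hx : P.contains x = true
    · have hxm : x ∈ P := List.contains_iff_mem.mp hx
      rw [if_neg (not_not_intro hx)]
      rw [ih s (acc ++ [false]) (P ++ [x]) ?_]
      · simp [pvG, hxm]
      · intro y
        rw [hs y]
        apply Bool.eq_iff_iff.mpr
        rw [List.contains_iff_mem, List.contains_iff_mem]
        simp only [List.mem_append, List.mem_singleton]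
        constructor
        · exact Or.inl
        · rintro (h | rfl)
          · exact h
          · exact hxm
    · rw [if_pos hx]
      have hmem : ∀ z, z ∈ s ↔ z ∈ P := by
        intro z
        constructor
        · intro hz
          exact List.contains_iff_mem.mp (by rw [← hs]; exact (PySem.Set.contains_iff s z).mpr hz)
        · intro hz
          exact (PySem.Set.contains_iff s z).mp (by rw [hs]; exact List.contains_iff_mem.mpr hz)
      have hxm : x ∉ P := fun h => by
        rw [List.contains_iff_mem.mpr h] at hx; exact absurd rfl hx
      rw [ih (PySem.Set.add s x) (acc ++ [true]) (P ++ [x]) ?_]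
      · simp only [Bool.not_eq_true] at hx
        simp [pvG, hxm]
      · intro y
        apply Bool.eq_iff_iff.mpr
        rw [PySem.Set.contains_iff, List.contains_iff_mem]
        rw [PySem.Set.mem_add s x y, List.mem_append, List.mem_singleton, hmem y]

-- The first-occurrence dict build: looking up y yields d's binding, else s + (first index of y in L).
theorem pvBuild (L : List String) (s : Int) (d : PySem.Dict String Int) (y : String) :
    ((PySem.List.enumerate L s).foldl
      (fun (d : PySem.Dict String Int) ix =>
        if ¬ (d.contains ix.2) then d.insert ix.2 ix.1 else d) d).get? y
    = (d.get? y).or ((PySem.List.index? L y).map (fun k => s + (k : Int))) := by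
  induction L generalizing s d with
  | nil => cases h : d.get? y <;> simp [PySem.List.enumerate_nil, PySem.List.index?_eq_idxOf?, h]
  | cons x t ih =>
    rw [PySem.List.enumerate_cons, List.foldl_cons]
    dsimp only
    by_cases hc : d.contains x = true
    · rw [if_neg (not_not_intro hc), ih]
      cases h : d.get? y with
      | some v => simp
      | none =>
        have hxy : x ≠ y := by
          intro e; subst e
          rw [PySem.Dict.get?_eq_none_iff_contains] at h
          rw [h] at hc; exact Bool.false_ne_true hc
        rw [PySem.List.index?_cons_of_ne t hxy]
        cases PySem.List.index? t y <;> simp; ring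
    · rw [if_pos hc, ih]
      by_cases hyx : y = x
      · subst hyx
        have h0 : d.get? y = none := by
          rw [PySem.Dict.get?_eq_none_iff_contains]; simpa using hc
        rw [PySem.Dict.get?_insert_self, h0, PySem.List.index?_cons_self]
        simp
      · rw [PySem.Dict.get?_insert_of_ne d s hyx]
        cases h : d.get? y with
        | some v => simp
        | none =>
          rw [PySem.List.index?_cons_of_ne t (Ne.symm hyx)]
          cases PySem.List.index? t y <;> simp; ring

-- first occurrence vs. prefix membership
theorem pvIndexTake (xs : List String) (v : String) (m t : Nat)
    (h : PySem.List.index? xs v = some m) : v ∈ xs.take t ↔ m < t := by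
  obtain ⟨hm, hv, hfirst⟩ := PySem.List.getElem_of_index?_eq_some h
  constructor
  · intro hmem
    obtain ⟨j, hj, hje⟩ := List.mem_take_iff_getElem.mp hmem
    by_contra hmt
    have hjm : ¬ j < m := fun hlt => hfirst j hlt hje
    omega
  · intro hmt
    exact List.mem_take_iff_getElem.mpr ⟨m, by omega, hv⟩

theorem alt_eq_pvG (A : List String) (B : List String) :
    merge_products_alt A B = pvG A B := by
  unfold merge_products_alt
  apply List.ext_getElem
  · simp [PySem.List.length_enumerate, pvG_length]
  · intro k h1 h2
    have hk : k < B.length := by rw [pvG_length] at h2; exact h2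
    simp only [List.getElem_map]
    rw [PySem.List.getElem_enumerate B 0 k (by simpa [PySem.List.length_enumerate] using hk)]
    rw [pvG_getElem B A k hk h2]
    rw [pvBuild (A ++ B) 0 PySem.Dict.empty B[k]]
    have hmem : B[k] ∈ A ++ B := List.mem_append_right A (List.getElem_mem hk)
    obtain ⟨m, hm⟩ := Option.isSome_iff_exists.mp ((PySem.List.index?_isSome_iff (A ++ B) B[k]).mpr hmem)
    have hle : m ≤ A.length + k := by
      obtain ⟨hmlt, hv, hfirst⟩ := PySem.List.getElem_of_index?_eq_some hm
      by_contra hgt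
      have hlt : A.length + k < m := by omega
      have : (A ++ B)[A.length + k] ≠ B[k] := by
        have h' := hfirst (A.length + k) hlt
        intro e
        exact h' (by simpa using e)
      exact this (by rw [List.getElem_append_right (by omega)]; congr 1; omega)
    have htake : B[k] ∈ (A ++ B).take (A.length + k) ↔ m < A.length + k :=
      pvIndexTake (A ++ B) B[k] m (A.length + k) hm
    have htk : (A ++ B).take (A.length + k) = A ++ B.take k := by
      rw [List.take_append, List.take_of_length_le (by omega)]
      simp
    rw [hm]
    simp only [PySem.Dict.get?_empty, Option.or]
    rw [htk] at htake
    by_cases hmem' : B[k] ∈ A ++ B.take k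
    · have hlt := htake.mp hmem'
      simp [hmem']
      omega
    · have hge : ¬ m < A.length + k := fun h => hmem' (htake.mpr h)
      simp [hmem']
      omega

-- ===== VERDICT (by name: the statement is the Claim_ definition above) =====
theorem merge_products_spec : Claim_equal_merge_products := by
  intro A B _
  show merge_products A B = merge_products_alt A B
  rw [alt_eq_pvG]
  unfold merge_products
  exact pvLoop B (PySem.Set.ofList A) [] A (fun y => by
    apply Bool.eq_iff_iff.mpr
    rw [PySem.Set.contains_iff, List.contains_iff_mem]
    exact PySem.Set.mem_ofList A y)
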